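-- pv_equiv track=rewrite | github.com/inxm-ai/enterprise-mcp-bridge | app/app_facade/generated_dummy_data.py | _preferred_type_from_union
-- ===== SOURCE A (Python) =====
-- from typing import Any, Dict, List, Optional
--
-- def _preferred_type_from_union(values: List[Any]) -> Optional[str]:
--     normalized = [value for value in values if isinstance(value, str)]
--     if not normalized:
--         return None
--     for preferred in (
--         "object",
--         "array",
--         "string",
--         "number",
--         "integer",
--         "boolean",
--         "null",
--     ):
--         if preferred in normalized:
--             return preferred
--     return normalized[0]
-- ===== SOURCE B (Python) =====
-- _RANK = {
--     "object": 0,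
--     "array": 1,
--     "string": 2,
--     "number": 3,
--     "integer": 4,
--     "boolean": 5,
--     "null": 6,
-- }
--
--
-- def _preferred_type_from_union(values):
--     normalized = [value for value in values if isinstance(value, str)]
--     if not normalized:
--         return None
--     best = None  # (rank, value) with the lowest rank seen so far
--     for value in normalized:
--         rank = _RANK.get(value)
--         if rank is not None and (best is None or rank < best[0]):
--             best = (rank, value)
--     return best[1] if best is not None else normalized[0]
-- ===== Notes on version B (the rewrite author's own statement) =====
-- stated objective: alternative
-- what changed: B makes a single pass over the input tracking the lowest-rank type via a rank dictionary, instead of A's loop over the fixed priority tuple with a membership scan of the input for each candidate.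
import Mathlib
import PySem

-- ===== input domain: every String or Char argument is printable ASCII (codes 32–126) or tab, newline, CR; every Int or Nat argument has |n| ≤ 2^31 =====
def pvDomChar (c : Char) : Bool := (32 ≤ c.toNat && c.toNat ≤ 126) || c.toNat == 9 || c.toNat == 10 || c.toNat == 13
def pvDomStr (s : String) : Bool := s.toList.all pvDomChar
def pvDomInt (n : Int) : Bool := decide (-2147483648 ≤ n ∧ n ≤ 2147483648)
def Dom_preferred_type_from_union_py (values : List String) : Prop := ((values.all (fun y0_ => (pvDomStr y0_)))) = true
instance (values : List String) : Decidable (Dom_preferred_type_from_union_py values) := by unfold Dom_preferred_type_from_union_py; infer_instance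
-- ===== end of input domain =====

-- B replaces A's scan over the fixed priority tuple (one membership test of the input per
-- candidate) by a single pass over the input tracking the lowest-rank type via a rank dict.

-- ===== PORT A =====
-- the fixed priority tuple of A's for-loop
def pvPrefs : List String :=
  ["object", "array", "string", "number", "integer", "boolean", "null"]

-- the for-loop of A: first preferred type contained in normalized, else fall through (none)
def pvALoop (normalized : List String) : List String → Option String
  | [] => none
  | p :: rest => if normalized.contains p then some p else pvALoop normalized rest

def preferred_type_from_union_py (values : List String) : Option String :=
  -- under the type convention every element is a str, so the isinstance filter keeps all
  let normalized := values
  match normalized with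
  | [] => none                      -- if not normalized: return None
  | v0 :: _ =>
    match pvALoop normalized pvPrefs with
    | some p => some p
    | none => some v0               -- return normalized[0]

-- ===== PORT B =====
-- the module-level dict literal _RANK of Source B
def pvRankDict : PySem.Dict String Int :=
  PySem.Dict.mk
    [("object", 0), ("array", 1), ("string", 2), ("number", 3),
     ("integer", 4), ("boolean", 5), ("null", 6)]

-- one iteration of B's for-loop: keep the (rank, value) pair with the lowest rank seen
def pvBStep (best : Option (Int × String)) (v : String) : Option (Int × String) :=
  match PySem.Dict.get? pvRankDict v with
  | none => best
  | some r =>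
    match best with
    | none => some (r, v)
    | some (br, _) => if r < br then some (r, v) else best

def preferred_type_from_union_py_alt (values : List String) : Option String :=
  -- under the type convention every element is a str, so the isinstance filter keeps all
  let normalized := values
  match normalized with
  | [] => none
  | v0 :: _ =>
    match normalized.foldl pvBStep none with
    | some (_, bv) => some bv
    | none => some v0

-- ===== PRECONDITION & SPEC =====
def Spec_preferred_type_from_union_py (values : List String) (out : Option String) : Prop := out = preferred_type_from_union_py_alt values
instance (values : List String) (out : Option String) : Decidable (Spec_preferred_type_from_union_py values out) := by unfold Spec_preferred_type_from_union_py; infer_instance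

-- ===== CLAIM (what is proved, stated in full; the proofs are below) =====
def Claim_equal_preferred_type_from_union_py : Prop := ∀ (values : List String), Dom_preferred_type_from_union_py values → Spec_preferred_type_from_union_py values (preferred_type_from_union_py values)

-- ===== LEMMAS AND PROOFS =====

-- left-biased minimum on (rank, value) accumulators
def pvOmin : Option (Int × String) → Option (Int × String) → Option (Int × String)
  | none, b => b
  | a, none => a
  | some (ra, va), some (rb, vb) => if rb < ra then some (rb, vb) else some (ra, va)

-- the accumulator B's fold reaches, as a function of the seven membership tests
def pvG (c0 c1 c2 c3 c4 c5 c6 : Bool) : Option (Int × String) :=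
  if c0 then some (0, "object")
  else if c1 then some (1, "array")
  else if c2 then some (2, "string")
  else if c3 then some (3, "number")
  else if c4 then some (4, "integer")
  else if c5 then some (5, "boolean")
  else if c6 then some (6, "null")
  else none

theorem pvOmin_none_right (a : Option (Int × String)) : pvOmin a none = a := by
  cases a <;> rfl

theorem pvBStep_eq_omin (acc : Option (Int × String)) (x : String) :
    pvBStep acc x = pvOmin acc (pvBStep none x) := by
  unfold pvBStep
  cases h : PySem.Dict.get? pvRankDict x with
  | none => exact (pvOmin_none_right acc).symm
  | some r =>
    cases acc with
    | none => rfl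
    | some p => rcases p with ⟨br, bv⟩; simp [pvOmin]

theorem pvOmin_assoc (a b c : Option (Int × String)) :
    pvOmin (pvOmin a b) c = pvOmin a (pvOmin b c) := by
  rcases a with _ | ⟨ra, va⟩ <;> rcases b with _ | ⟨rb, vb⟩ <;> rcases c with _ | ⟨rc, vc⟩ <;>
    simp only [pvOmin] <;> split_ifs <;>
    first
      | rfl
      | omega
      | (simp only [pvOmin]; split_ifs <;> first | rfl | omega)

theorem pvFold_omin (ns : List String) (acc : Option (Int × String)) :
    ns.foldl pvBStep acc = pvOmin acc (ns.foldl pvBStep none) := by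
  induction ns generalizing acc with
  | nil => simp [pvOmin_none_right]
  | cons x ns ih =>
    simp only [List.foldl_cons]
    rw [ih (pvBStep acc x), ih (pvBStep none x), pvBStep_eq_omin acc x, pvOmin_assoc]

-- how absorbing one ranked element updates the accumulator, rank by rank
theorem pvGmin_0 : ∀ c0 c1 c2 c3 c4 c5 c6 : Bool,
    pvOmin (some (0, "object")) (pvG c0 c1 c2 c3 c4 c5 c6) = pvG true c1 c2 c3 c4 c5 c6 := by decide
theorem pvGmin_1 : ∀ c0 c1 c2 c3 c4 c5 c6 : Bool,
    pvOmin (some (1, "array")) (pvG c0 c1 c2 c3 c4 c5 c6) = pvG c0 true c2 c3 c4 c5 c6 := by decide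
theorem pvGmin_2 : ∀ c0 c1 c2 c3 c4 c5 c6 : Bool,
    pvOmin (some (2, "string")) (pvG c0 c1 c2 c3 c4 c5 c6) = pvG c0 c1 true c3 c4 c5 c6 := by decide
theorem pvGmin_3 : ∀ c0 c1 c2 c3 c4 c5 c6 : Bool,
    pvOmin (some (3, "number")) (pvG c0 c1 c2 c3 c4 c5 c6) = pvG c0 c1 c2 true c4 c5 c6 := by decide
theorem pvGmin_4 : ∀ c0 c1 c2 c3 c4 c5 c6 : Bool,
    pvOmin (some (4, "integer")) (pvG c0 c1 c2 c3 c4 c5 c6) = pvG c0 c1 c2 c3 true c5 c6 := by decide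
theorem pvGmin_5 : ∀ c0 c1 c2 c3 c4 c5 c6 : Bool,
    pvOmin (some (5, "boolean")) (pvG c0 c1 c2 c3 c4 c5 c6) = pvG c0 c1 c2 c3 c4 true c6 := by decide
theorem pvGmin_6 : ∀ c0 c1 c2 c3 c4 c5 c6 : Bool,
    pvOmin (some (6, "null")) (pvG c0 c1 c2 c3 c4 c5 c6) = pvG c0 c1 c2 c3 c4 c5 true := by decide

-- characterization of B's fold by the seven membership tests
theorem pvFold_char (ns : List String) :
    ns.foldl pvBStep none =
      pvG (ns.contains "object") (ns.contains "array") (ns.contains "string")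
        (ns.contains "number") (ns.contains "integer") (ns.contains "boolean")
        (ns.contains "null") := by
  induction ns with
  | nil => rfl
  | cons x ns ih =>
    have hfold : (x :: ns).foldl pvBStep none = pvOmin (pvBStep none x) (ns.foldl pvBStep none) := by
      simp only [List.foldl_cons]; exact pvFold_omin ns (pvBStep none x)
    rw [hfold, ih]
    by_cases h0 : x = "object"
    · subst h0
      rw [show pvBStep none "object" = some ((0 : Int), "object") from rfl]
      simp only [List.contains_cons]
      simp [pvGmin_0]
    by_cases h1 : x = "array"
    · subst h1
      rw [show pvBStep none "array" = some ((1 : Int), "array") from rfl]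
      simp only [List.contains_cons]
      simp [pvGmin_1]
    by_cases h2 : x = "string"
    · subst h2
      rw [show pvBStep none "string" = some ((2 : Int), "string") from rfl]
      simp only [List.contains_cons]
      simp [pvGmin_2]
    by_cases h3 : x = "number"
    · subst h3
      rw [show pvBStep none "number" = some ((3 : Int), "number") from rfl]
      simp only [List.contains_cons]
      simp [pvGmin_3]
    by_cases h4 : x = "integer"
    · subst h4
      rw [show pvBStep none "integer" = some ((4 : Int), "integer") from rfl]
      simp only [List.contains_cons]
      simp [pvGmin_4]
    by_cases h5 : x = "boolean"
    · subst h5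
      rw [show pvBStep none "boolean" = some ((5 : Int), "boolean") from rfl]
      simp only [List.contains_cons]
      simp [pvGmin_5]
    by_cases h6 : x = "null"
    · subst h6
      rw [show pvBStep none "null" = some ((6 : Int), "null") from rfl]
      simp only [List.contains_cons]
      simp [pvGmin_6]
    · have hstep : pvBStep none x = none := by
        simp [pvBStep, pvRankDict, PySem.Dict.get?,
          Ne.symm h0, Ne.symm h1, Ne.symm h2, Ne.symm h3, Ne.symm h4, Ne.symm h5, Ne.symm h6]
      rw [hstep]
      simp only [List.contains_cons]
      have e0 : ("object" == x) = false := beq_eq_false_iff_ne.mpr (Ne.symm h0)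
      have e1 : ("array" == x) = false := beq_eq_false_iff_ne.mpr (Ne.symm h1)
      have e2 : ("string" == x) = false := beq_eq_false_iff_ne.mpr (Ne.symm h2)
      have e3 : ("number" == x) = false := beq_eq_false_iff_ne.mpr (Ne.symm h3)
      have e4 : ("integer" == x) = false := beq_eq_false_iff_ne.mpr (Ne.symm h4)
      have e5 : ("boolean" == x) = false := beq_eq_false_iff_ne.mpr (Ne.symm h5)
      have e6 : ("null" == x) = false := beq_eq_false_iff_ne.mpr (Ne.symm h6)
      simp [pvOmin, e0, e1, e2, e3, e4, e5, e6]

-- A's loop over the fixed tuple is the projection of the same seven-test table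
theorem pvALoop_eq_proj (ns : List String) :
    pvALoop ns pvPrefs =
      (match pvG (ns.contains "object") (ns.contains "array") (ns.contains "string")
        (ns.contains "number") (ns.contains "integer") (ns.contains "boolean")
        (ns.contains "null") with
        | some (_, bv) => some bv
        | none => none) := by
  unfold pvPrefs pvG
  simp only [pvALoop]
  split_ifs <;> rfl

-- ===== VERDICT (by name: the statement is the Claim_ definition above) =====
theorem preferred_type_from_union_py_spec : Claim_equal_preferred_type_from_union_py := by
  intro values _
  unfold Spec_preferred_type_from_union_py preferred_type_from_union_py preferred_type_from_union_py_alt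
  cases values with
  | nil => rfl
  | cons v0 rest =>
    simp only
    rw [pvFold_char (v0 :: rest), pvALoop_eq_proj (v0 :: rest)]
    cases pvG ((v0 :: rest).contains "object") _ _ _ _ _ _ with
    | none => rfl
    | some p => rcases p with ⟨r, bv⟩; rfl
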